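-- pv_equiv track=rewrite | github.com/AndersonHsieh0330/serve_tournament_scripts | main.py | check_zeros
-- ===== SOURCE A (Python) =====
-- def check_zeros(cur_schedule, num_of_total_games):
--     games_with_error = [False for i in range(num_of_total_games)]
--
--     for game_index, game in enumerate(cur_schedule):
--         for court in game:
--             empty_court_warning = False # true when we expect the current court is zero
--             for side_index,side in enumerate(court):
--                 if games_with_error[game_index]: break # already detected error in this game, skip
--                 for team_index,team in enumerate(side):
--                     if team == 0:
--                         # team number 0 is detected
--                         if team_index == 0 and side_index == 0:
--                             # this is the first team of the first side when team number 0 is detected, don't report error yet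
--                             # set empty court warning
--                             empty_court_warning = True
--                         else:
--                             if not empty_court_warning:
--                                 # zero is detected not at first side of first team, and we didn't anticipate this(warning is false)
--                                 # report error
--                                 games_with_error[game_index] = True
--                                 break
--                     else:
--                         # current team number is not zero
--                         if empty_court_warning:
--                             # but we're anticipating a zero
--                             # report error
--                             games_with_error[game_index] = True
--                             break
--
--     # the games with 1 at its index contain errors
--     return games_with_error
-- ===== SOURCE B (Python) =====
-- def check_zeros(cur_schedule, num_of_total_games):
--     # Count-based check: a court is invalid exactly when it mixes zero and
--     # non-zero team numbers (0 < number of zero teams < total teams).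
--     flags = [False] * num_of_total_games
--     for i in range(min(len(flags), len(cur_schedule))):
--         for court in cur_schedule[i]:
--             teams = [team for side in court for team in side]
--             zeros = teams.count(0)
--             if 0 < zeros < len(teams):
--                 flags[i] = True
--                 break
--     return flags
-- ===== Notes on version B (the rewrite author's own statement) =====
-- stated objective: simpler
-- what changed: Replaces A's four nested loops with a mutable warning/break state machine by a count-based check: flatten each court and flag it iff 0 < number-of-zero-teams < total teams, so no mode/first-element comparison or warning state is needed.
-- intended difference: On games (at a flagged-range index) with no zero/non-zero mixed court but containing an all-zero court whose first side is empty, A returns True for that game (its expected-zero mode is keyed to court[0][0], so an empty first side makes every zero look unexpected) while B returns False, the intended value since a court whose teams are all zero is a validly empty court. — e.g. on check_zeros([[[[], [0]]]], 1): A returns [true], B returns [false]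
import Mathlib
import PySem

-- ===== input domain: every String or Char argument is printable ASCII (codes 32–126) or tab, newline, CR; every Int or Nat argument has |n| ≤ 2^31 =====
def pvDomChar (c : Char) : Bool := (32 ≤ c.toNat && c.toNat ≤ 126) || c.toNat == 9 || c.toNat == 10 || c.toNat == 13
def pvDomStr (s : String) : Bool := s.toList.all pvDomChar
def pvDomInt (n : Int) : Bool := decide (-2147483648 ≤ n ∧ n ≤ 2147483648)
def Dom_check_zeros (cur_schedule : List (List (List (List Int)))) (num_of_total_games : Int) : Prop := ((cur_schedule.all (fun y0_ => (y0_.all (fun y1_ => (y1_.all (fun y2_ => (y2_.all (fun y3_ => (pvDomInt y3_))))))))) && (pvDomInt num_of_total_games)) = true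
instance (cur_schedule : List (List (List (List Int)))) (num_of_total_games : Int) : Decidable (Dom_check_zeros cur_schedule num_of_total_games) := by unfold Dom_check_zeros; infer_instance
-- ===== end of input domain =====

-- B replaces A's four nested loops with mutable warning/break state machine by a count-based
-- check (a court is invalid iff 0 < #zero-teams < #teams); on games whose only anomaly is an
-- all-zero court with an empty first side A flags and B does not (D_ below; B's value intended).


-- ===== PORT A =====
-- inner `for team_index, team in enumerate(side)` loop; returns (warning, error-set+break?)
def pvTeamLoop (side : List Int) (team_index side_index : Nat) (warning : Bool) : Bool × Bool :=
  match side with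
  | [] => (warning, false)
  | team :: rest =>
    if team == 0 then
      if team_index == 0 && side_index == 0 then
        pvTeamLoop rest (team_index + 1) side_index true
      else
        if !warning then (warning, true)
        else pvTeamLoop rest (team_index + 1) side_index warning
    else
      if warning then (warning, true)
      else pvTeamLoop rest (team_index + 1) side_index warning

-- `for side_index, side in enumerate(court)` loop; reads/writes games_with_error[game_index]
def pvSideLoop (sides : List (List Int)) (side_index : Nat) (warning : Bool)
    (gwe : List Bool) (game_index : Nat) : List Bool :=
  match sides with
  | [] => gwe
  | side :: rest =>
    if gwe.getD game_index false then gwe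
    else
      let r := pvTeamLoop side 0 side_index warning
      if r.2 then pvSideLoop rest (side_index + 1) r.1 (gwe.set game_index true) game_index
      else pvSideLoop rest (side_index + 1) r.1 gwe game_index

-- `for court in game` loop; empty_court_warning reset to False per court
def pvCourtLoop (courts : List (List (List Int))) (gwe : List Bool) (game_index : Nat) : List Bool :=
  match courts with
  | [] => gwe
  | court :: rest => pvCourtLoop rest (pvSideLoop court 0 false gwe game_index) game_index

-- `for game_index, game in enumerate(cur_schedule)` loop
def pvGameLoop (cs : List (List (List (List Int)))) (gwe : List Bool) (game_index : Nat) : List Bool :=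
  match cs with
  | [] => gwe
  | g :: rest => pvGameLoop rest (pvCourtLoop g gwe game_index) (game_index + 1)

def check_zeros (cur_schedule : List (List (List (List Int)))) (num_of_total_games : Int) : List Bool :=
  pvGameLoop cur_schedule (List.replicate num_of_total_games.toNat false) 0

-- ===== PORT B =====
-- teams = [team for side in court for team in side]; zeros = teams.count(0); 0 < zeros < len(teams)
def pvMixed (court : List (List Int)) : Bool :=
  let teams := court.flatMap (fun side => side)
  let zeros := teams.count 0
  decide (0 < zeros) && decide (zeros < teams.length)

-- `for court in cur_schedule[i]` loop with its break after flags[i] = True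
def pvBGame (courts : List (List (List Int))) (flags : List Bool) (i : Nat) : List Bool :=
  match courts with
  | [] => flags
  | c :: rest => if pvMixed c then flags.set i true else pvBGame rest flags i

def check_zeros_alt (cur_schedule : List (List (List (List Int)))) (num_of_total_games : Int) : List Bool :=
  let flags := List.replicate num_of_total_games.toNat false
  (List.range (min flags.length cur_schedule.length)).foldl
    (fun fl i => pvBGame (cur_schedule.getD i []) fl i) flags

-- ===== PRECONDITION & SPEC =====
-- Pre_ excludes exactly the inputs on which A raises IndexError: a game at index
-- i ≥ num_of_total_games containing a court with at least one side (A reads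
-- games_with_error[i] there).
def Pre_check_zeros (cur_schedule : List (List (List (List Int)))) (num_of_total_games : Int) : Prop :=
  ∀ i : Nat, i < cur_schedule.length →
    (cur_schedule.getD i []).any (fun court => !court.isEmpty) →
    (i : Int) < num_of_total_games
instance (cur_schedule : List (List (List (List Int)))) (num_of_total_games : Int) : Decidable (Pre_check_zeros cur_schedule num_of_total_games) := by unfold Pre_check_zeros; infer_instance

def pvWitness_check_zeros : List (List (List (List Int))) × Int := ([[[[0], [1]]]], 1)

-- On games (at a flagged-range index) that contain no zero/non-zero mixed court but do contain
-- an all-zero court whose first side is empty, A returns True for that game (its expected-zero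
-- mode is keyed to court[0][0], so with an empty first side every zero looks unexpected), while
-- B returns False, the intended value: a court whose teams are all zero is a validly empty court.
def D_check_zeros (cur_schedule : List (List (List (List Int)))) (num_of_total_games : Int) : Prop :=
  ∃ i < min cur_schedule.length num_of_total_games.toNat,
    (∃ c ∈ cur_schedule.getD i [], (c.headD []).isEmpty ∧ 0 ∈ c.flatMap id) ∧
    ∀ c ∈ cur_schedule.getD i [], 0 ∉ c.flatMap id ∨ ∀ t ∈ c.flatMap id, t = 0
instance (cur_schedule : List (List (List (List Int)))) (num_of_total_games : Int) : Decidable (D_check_zeros cur_schedule num_of_total_games) := by unfold D_check_zeros; infer_instance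

def Spec_check_zeros (cur_schedule : List (List (List (List Int)))) (num_of_total_games : Int) (out : List Bool) : Prop := ¬ D_check_zeros cur_schedule num_of_total_games → out = check_zeros_alt cur_schedule num_of_total_games
instance (cur_schedule : List (List (List (List Int)))) (num_of_total_games : Int) (out : List Bool) : Decidable (Spec_check_zeros cur_schedule num_of_total_games out) := by unfold Spec_check_zeros; infer_instance

def pvDiffWitness_check_zeros : List (List (List (List Int))) × Int := ([[[[], [0]]]], 1)
def pvDiffWitnessOut_check_zeros : (List Bool) × (List Bool) := ([true], [false])

-- ===== CLAIM (what is proved, stated in full; the proofs are below) =====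
def Claim_unchanged_check_zeros : Prop := ∀ (cur_schedule : List (List (List (List Int)))) (num_of_total_games : Int), Dom_check_zeros cur_schedule num_of_total_games → Pre_check_zeros cur_schedule num_of_total_games → Spec_check_zeros cur_schedule num_of_total_games (check_zeros cur_schedule num_of_total_games)
def Claim_changed_check_zeros : Prop := Dom_check_zeros (pvDiffWitness_check_zeros.1) (pvDiffWitness_check_zeros.2) ∧ Pre_check_zeros (pvDiffWitness_check_zeros.1) (pvDiffWitness_check_zeros.2) ∧ D_check_zeros (pvDiffWitness_check_zeros.1) (pvDiffWitness_check_zeros.2) ∧ check_zeros (pvDiffWitness_check_zeros.1) (pvDiffWitness_check_zeros.2) = pvDiffWitnessOut_check_zeros.1 ∧ check_zeros_alt (pvDiffWitness_check_zeros.1) (pvDiffWitness_check_zeros.2) = pvDiffWitnessOut_check_zeros.2 ∧ pvDiffWitnessOut_check_zeros.1 ≠ pvDiffWitnessOut_check_zeros.2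
def Claim_exact_check_zeros : Prop := ∀ (cur_schedule : List (List (List (List Int)))) (num_of_total_games : Int), Dom_check_zeros cur_schedule num_of_total_games → Pre_check_zeros cur_schedule num_of_total_games → D_check_zeros cur_schedule num_of_total_games → check_zeros cur_schedule num_of_total_games ≠ check_zeros_alt cur_schedule num_of_total_games

-- ===== LEMMAS AND PROOFS =====

-- a side is "bad" relative to mode m
def pvSideBad (m : Bool) (side : List Int) : Bool := side.any (fun t => (t == 0) != m)

-- the per-court predicate A's state machine computes
def pvCourtBad (court : List (List Int)) : Bool :=
  let mode := !court.isEmpty && !(court.headD []).isEmpty && ((court.headD []).headD 0 == 0)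
  court.any (fun side => side.any (fun team => (team == 0) != mode))

theorem pvTeamLoop_not_first (side : List Int) (t s : Nat) (w : Bool)
    (h : ¬(t = 0 ∧ s = 0)) : pvTeamLoop side t s w = (w, pvSideBad w side) := by
  induction side generalizing t with
  | nil => simp [pvTeamLoop, pvSideBad]
  | cons team rest ih =>
    have hts : (t == 0 && s == 0) = false := by
      rcases Nat.eq_zero_or_pos t with ht | ht
      · subst ht; simp_all
      · simp [Nat.pos_iff_ne_zero.mp ht]
    by_cases hz : team = 0
    · subst hz
      simp only [pvTeamLoop, hts, if_pos (by simp : ((0:Int) == 0) = true), Bool.false_eq_true, if_false]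
      cases w with
      | false => simp [pvSideBad]
      | true =>
        rw [if_neg (by simp), ih (t + 1) (by omega)]
        simp [pvSideBad]
    · have hbz : (team == 0) = false := by simp [hz]
      simp only [pvTeamLoop, hbz, Bool.false_eq_true, if_false]
      cases w with
      | true => simp [pvSideBad, hbz]
      | false =>
        rw [if_neg (by simp), ih (t + 1) (by omega)]
        simp [pvSideBad, hbz]

-- the mode B computes for a court whose first side is `side0`
theorem pvTeamLoop_first (court : List (List Int)) (side0 : List Int) (rest : List (List Int))
    (hc : court = side0 :: rest) :
    pvTeamLoop side0 0 0 false =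
      (!court.isEmpty && !(court.headD []).isEmpty && ((court.headD []).headD 0 == 0),
       pvSideBad (!court.isEmpty && !(court.headD []).isEmpty && ((court.headD []).headD 0 == 0)) side0) := by
  subst hc
  cases side0 with
  | nil => simp [pvTeamLoop, pvSideBad]
  | cons team rest0 =>
    by_cases hz : team = 0
    · subst hz
      simp only [pvTeamLoop, if_pos (by simp : ((0:Int) == 0) = true), if_pos (by simp : (0 == 0 && 0 == 0) = true)]
      rw [pvTeamLoop_not_first rest0 1 0 true (by omega)]
      simp [pvSideBad]
    · have hbz : (team == 0) = false := by simp [hz]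
      simp only [pvTeamLoop, hbz, Bool.false_eq_true, if_false, if_neg (by simp : ¬ (false = true))]
      rw [pvTeamLoop_not_first rest0 1 0 false (by omega)]
      simp [pvSideBad, hbz]

theorem pvSideLoop_done (sides : List (List Int)) (s : Nat) (w : Bool)
    (gwe : List Bool) (g : Nat) (h : gwe.getD g false = true) :
    pvSideLoop sides s w gwe g = gwe := by
  unfold List.getD at h
  cases sides <;> simp [pvSideLoop, h]

theorem pvSideLoop_rest (sides : List (List Int)) (s : Nat) (m : Bool)
    (gwe : List Bool) (g : Nat) (hs : s ≠ 0) (hg : g < gwe.length)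
    (hf : gwe.getD g false = false) :
    pvSideLoop sides s m gwe g =
      if sides.any (pvSideBad m) then gwe.set g true else gwe := by
  induction sides generalizing s with
  | nil => simp [pvSideLoop]
  | cons side rest ih =>
    have hfa : gwe[g]?.getD false = false := hf
    simp only [pvSideLoop, hfa, Bool.false_eq_true, if_false,
      pvTeamLoop_not_first side 0 s m (by omega)]
    by_cases hb : pvSideBad m side = true
    · simp only [hb, if_true]
      have hset : (gwe.set g true).getD g false = true := by
        simp [List.getD, hg]
      rw [pvSideLoop_done _ _ _ _ _ hset]
      simp [List.any_cons, hb, hfa]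
    · simp only [hb, Bool.false_eq_true, if_false]
      rw [ih (s + 1) (by omega)]
      simp [List.any_cons, Bool.of_not_eq_true hb, hfa]

theorem pvSideLoop_court (court : List (List Int)) (gwe : List Bool) (g : Nat)
    (hg : court ≠ [] → g < gwe.length) (hf : gwe.getD g false = false) :
    pvSideLoop court 0 false gwe g = if pvCourtBad court then gwe.set g true else gwe := by
  cases court with
  | nil => simp [pvSideLoop, pvCourtBad]
  | cons side0 rest =>
    have hg' : g < gwe.length := hg (by simp)
    have hfa : gwe[g]?.getD false = false := hf
    simp only [pvSideLoop, hfa, Bool.false_eq_true, if_false,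
      pvTeamLoop_first (side0 :: rest) side0 rest rfl]
    set m := !(side0 :: rest).isEmpty && !((side0 :: rest).headD []).isEmpty &&
      (((side0 :: rest).headD []).headD 0 == 0) with hm
    have hcb : pvCourtBad (side0 :: rest) = (pvSideBad m side0 || rest.any (pvSideBad m)) := rfl
    by_cases hb : pvSideBad m side0 = true
    · simp only [hb, if_true]
      have hset : (gwe.set g true).getD g false = true := by
        simp [List.getD, hg']
      rw [pvSideLoop_done _ _ _ _ _ hset, hcb, hb]
      simp [hfa]
    · simp only [hb, Bool.false_eq_true, if_false]
      rw [pvSideLoop_rest rest 1 m gwe g (by omega) hg' hf, hcb,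
        Bool.of_not_eq_true hb]
      simp [hfa]

theorem pvSideLoop_length (sides : List (List Int)) (s : Nat) (w : Bool)
    (gwe : List Bool) (g : Nat) : (pvSideLoop sides s w gwe g).length = gwe.length := by
  induction sides generalizing s w gwe with
  | nil => simp [pvSideLoop]
  | cons side rest ih =>
    simp only [pvSideLoop]
    cases h : gwe.getD g false with
    | true => simp [h]
    | false =>
      simp only [h, Bool.false_eq_true, if_false]
      split <;> simp [ih]

theorem pvCourtLoop_game (courts : List (List (List Int))) (gwe : List Bool) (g : Nat)
    (hg : (courts.any (fun c => !c.isEmpty)) = true → g < gwe.length)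
    (hf : gwe.getD g false = false) :
    pvCourtLoop courts gwe g = if courts.any pvCourtBad then gwe.set g true else gwe := by
  induction courts generalizing gwe with
  | nil => simp [pvCourtLoop]
  | cons court rest ih =>
    simp only [pvCourtLoop]
    rw [pvSideLoop_court court gwe g (fun hne => hg (by simp [hne])) hf]
    by_cases hb : pvCourtBad court = true
    · have hce : court ≠ [] := by
        intro h; subst h; simp [pvCourtBad] at hb
      have hg' : g < gwe.length := hg (by simp [hce])
      simp only [hb, if_true]
      have hset : ∀ cs2 : List (List (List Int)),
          pvCourtLoop cs2 (gwe.set g true) g = gwe.set g true := by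
        intro cs2
        induction cs2 with
        | nil => rfl
        | cons c2 r2 ih2 =>
          simp only [pvCourtLoop]
          rw [pvSideLoop_done _ _ _ _ _ (by simp [List.getD, List.getElem?_set_self, hg'])]
          exact ih2
      simp [hset, List.any_cons, hb]
    · have hbf : pvCourtBad court = false := Bool.of_not_eq_true hb
      rw [hbf]
      simp only [Bool.false_eq_true, if_false]
      rw [ih gwe (fun h => hg (by simp [h])) hf]
      simp [List.any_cons, hbf]

theorem pvGameLoop_getD (cs : List (List (List (List Int)))) (gwe : List Bool) (k : Nat)
    (hpre : ∀ i : Nat, i < cs.length →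
      ((cs.getD i []).any (fun c => !c.isEmpty)) = true → k + i < gwe.length)
    (hf : ∀ j : Nat, k ≤ j → gwe.getD j false = false) (j : Nat) :
    (pvGameLoop cs gwe k).getD j false =
      if j < k then gwe.getD j false
      else decide (j - k < cs.length) && (cs.getD (j - k) []).any pvCourtBad := by
  induction cs generalizing gwe k with
  | nil =>
    simp only [pvGameLoop, List.length_nil]
    split
    · rfl
    · exact hf j (by omega)
  | cons g rest ih =>
    have hc := pvCourtLoop_game g gwe k
      (fun h => by simpa using hpre 0 (by simp) (by simpa using h))
      (hf k (le_refl k))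
    by_cases hb : g.any pvCourtBad = true
    · have hkl : k < gwe.length := by
        have h0 : (((g :: rest).getD 0 []).any fun c => !c.isEmpty) = true := by
          rcases List.any_eq_true.mp hb with ⟨c, hcmem, hcb⟩
          have hce : c ≠ [] := fun h => by subst h; simp [pvCourtBad] at hcb
          simp only [List.getD_cons_zero, List.any_eq_true]
          exact ⟨c, hcmem, by
            cases c with
            | nil => exact absurd rfl hce
            | cons a l => rfl⟩
        simpa using hpre 0 (by simp) h0
      have hstep : pvGameLoop (g :: rest) gwe k = pvGameLoop rest (gwe.set k true) (k + 1) := by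
        simp only [pvGameLoop]
        rw [hc, if_pos hb]
      rw [hstep, ih (gwe.set k true) (k + 1)
        (fun i hi h => by
          have := hpre (i + 1) (by simpa using Nat.succ_lt_succ hi) (by simpa using h)
          simp only [List.length_set]; omega)
        (fun j2 hj2 => by
          have h1 := hf j2 (by omega)
          unfold List.getD at h1 ⊢
          rw [List.getElem?_set, if_neg (by omega : ¬ k = j2)]
          exact h1)]
      by_cases hjk : j < k
      · rw [if_pos (by omega), if_pos hjk]
        unfold List.getD
        rw [List.getElem?_set]
        simp [show ¬ k = j by omega]
      · by_cases hje : j = k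
        · subst hje
          rw [if_pos (by omega), if_neg (by omega)]
          unfold List.getD
          rw [List.getElem?_set]
          simp [hkl, hb, Nat.sub_self]
        · rw [if_neg (by omega), if_neg (by omega)]
          have h2 : j - k = (j - (k + 1)) + 1 := by omega
          simp only [List.length_cons, h2, List.getD_cons_succ]
          congr 1
          simp only [decide_eq_decide]
          omega
    · have hbf : g.any pvCourtBad = false := Bool.of_not_eq_true hb
      have hstep : pvGameLoop (g :: rest) gwe k = pvGameLoop rest gwe (k + 1) := by
        simp only [pvGameLoop]
        rw [hc, hbf]
        simp
      rw [hstep, ih gwe (k + 1)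
        (fun i hi h => by
          have := hpre (i + 1) (by simpa using Nat.succ_lt_succ hi) (by simpa using h)
          omega)
        (fun j2 hj2 => hf j2 (by omega))]
      by_cases hjk : j < k
      · rw [if_pos (by omega), if_pos hjk]
      · by_cases hje : j = k
        · subst hje
          rw [if_pos (by omega), if_neg (by omega), hf j le_rfl]
          simp [hbf]
        · rw [if_neg (by omega), if_neg (by omega)]
          have h2 : j - k = (j - (k + 1)) + 1 := by omega
          simp only [List.length_cons, h2, List.getD_cons_succ]
          congr 1
          simp only [decide_eq_decide]
          omega

theorem pvGameLoop_length (cs : List (List (List (List Int)))) (gwe : List Bool) (k : Nat) :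
    (pvGameLoop cs gwe k).length = gwe.length := by
  induction cs generalizing gwe k with
  | nil => rfl
  | cons g rest ih =>
    simp only [pvGameLoop]
    rw [ih]
    clear ih
    induction g generalizing gwe with
    | nil => rfl
    | cons c r ihc =>
      simp only [pvCourtLoop]
      rw [ihc (pvSideLoop c 0 false gwe k)]
      exact pvSideLoop_length c 0 false gwe k

-- proof-side helpers for the D_ region
def pvHasZero (court : List (List Int)) : Bool := court.any (fun s => s.any (fun t => t == 0))
def pvHasNonzero (court : List (List Int)) : Bool := court.any (fun s => s.any (fun t => !(t == 0)))
def pvDMixed (court : List (List Int)) : Bool := pvHasZero court && pvHasNonzero court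
def pvDZ (court : List (List Int)) : Bool :=
  pvHasZero court && !pvHasNonzero court && (court.headD []).isEmpty

-- ----- per-court predicate: A's pvCourtBad = B's pvMixed ∨ the D_ anomaly pvDZ -----

theorem pv_anyZero (T : List Int) : T.any (fun t => t == 0) = decide (0 < T.count 0) := by
  rw [Bool.eq_iff_iff]
  simp only [List.any_eq_true, beq_iff_eq, decide_eq_true_eq, List.count_pos_iff]
  exact ⟨fun ⟨t, ht, he⟩ => he ▸ ht, fun h => ⟨0, h, rfl⟩⟩

theorem pv_anyNonzero (T : List Int) :
    T.any (fun t => !(t == 0)) = decide (T.count 0 < T.length) := by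
  rw [Bool.eq_iff_iff]
  have hle := List.count_le_length (l := T) (a := (0 : Int))
  have heq := List.count_eq_length (l := T) (a := (0 : Int))
  simp only [List.any_eq_true, Bool.not_eq_eq_eq_not, Bool.not_true, beq_eq_false_iff_ne,
    ne_eq, decide_eq_true_eq]
  constructor
  · rintro ⟨t, ht, hne⟩
    rcases Nat.lt_or_ge (T.count 0) T.length with h | h
    · exact h
    · exact absurd (heq.mp (by omega) t ht).symm hne
  · intro h
    by_contra hall
    push Not at hall
    have : T.count 0 = T.length := heq.mpr (fun b hb => (hall b hb).symm)
    omega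

theorem pv_any_flat (c : List (List Int)) (p : Int → Bool) :
    c.any (fun s => s.any p) = (c.flatMap (fun s => s)).any p := by
  induction c with
  | nil => rfl
  | cons s rest ih => rw [List.any_cons, List.flatMap_cons, List.any_append, ih]

theorem pvCourtBad_eq (c : List (List Int)) : pvCourtBad c = (pvMixed c || pvDZ c) := by
  rcases c with _ | ⟨s0, rest⟩
  · rfl
  · rcases s0 with _ | ⟨t0, ts⟩
    · -- first side empty: mode = false
      simp only [pvCourtBad, pvMixed, pvDZ, pvHasZero, pvHasNonzero, List.headD_cons,
        List.isEmpty_cons, List.isEmpty_nil, List.headD_nil, Bool.not_false, Bool.and_true,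
        Bool.not_true, Bool.false_and, Bool.and_false, Bool.bne_false, pv_any_flat]
      rw [pv_anyZero, pv_anyNonzero]
      cases h1 : decide (0 < ((([] : List Int) :: rest).flatMap (fun s => s)).count 0) <;>
        cases h2 : decide (((([] : List Int) :: rest).flatMap (fun s => s)).count 0 <
          ((([] : List Int) :: rest).flatMap (fun s => s)).length) <;> simp
    · have hmem : t0 ∈ ((t0 :: ts) :: rest).flatMap (fun s => s) := by
        simp [List.flatMap_cons]
      by_cases h0 : t0 = 0
      · subst h0
        have h0z : 0 < (((((0 : Int) :: ts) :: rest).flatMap (fun s => s)).count 0) :=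
          List.count_pos_iff.mpr hmem
        simp only [pvCourtBad, pvMixed, pvDZ, pvHasZero, pvHasNonzero, List.headD_cons,
          List.isEmpty_cons, Bool.and_false, Bool.or_false, Bool.not_false,
          Bool.and_true, Bool.true_and, beq_self_eq_true, Bool.bne_true, pv_any_flat]
        rw [pv_anyNonzero, decide_eq_true h0z, Bool.true_and]
      · have hlt : (((t0 :: ts) :: rest).flatMap (fun s => s)).count 0 <
            (((t0 :: ts) :: rest).flatMap (fun s => s)).length := by
          have hle := List.count_le_length (l := ((t0 :: ts) :: rest).flatMap (fun s => s)) (a := (0:Int))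
          rcases Nat.lt_or_ge ((((t0 :: ts) :: rest).flatMap (fun s => s)).count 0)
            ((((t0 :: ts) :: rest).flatMap (fun s => s)).length) with h | h
          · exact h
          · exact absurd (List.count_eq_length.mp (by omega) t0 hmem).symm h0
        have hbeq : (t0 == 0) = false := by simp [h0]
        simp only [pvCourtBad, pvMixed, pvDZ, pvHasZero, pvHasNonzero, List.headD_cons,
          List.isEmpty_cons, Bool.and_false, Bool.or_false, Bool.not_false, Bool.and_true,
          Bool.true_and, hbeq, Bool.bne_false, pv_any_flat]
        rw [pv_anyZero, decide_eq_true hlt, Bool.and_true]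

theorem pvDMixed_eq (c : List (List Int)) : pvDMixed c = pvMixed c := by
  simp only [pvDMixed, pvHasZero, pvHasNonzero, pv_any_flat]
  rw [pv_anyZero, pv_anyNonzero]
  rfl

theorem pv_any_ext {α : Type} (l : List α) (p q : α → Bool) (h : ∀ a, p a = q a) :
    l.any p = l.any q := by
  induction l with
  | nil => rfl
  | cons a r ih => simp only [List.any_cons, h, ih]

theorem pv_game_iff (g : List (List (List Int))) :
    ((∃ c ∈ g, (c.headD []).isEmpty ∧ 0 ∈ c.flatMap id) ∧
      ∀ c ∈ g, 0 ∉ c.flatMap id ∨ ∀ t ∈ c.flatMap id, t = 0)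
    ↔ (g.any pvDZ = true ∧ g.any pvDMixed = false) := by
  simp only [pvDZ, pvDMixed, pvHasZero, pvHasNonzero, List.any_eq_true, List.any_eq_false,
    Bool.and_eq_true, Bool.not_eq_true', List.any_eq_false, Bool.not_eq_true,
    beq_iff_eq, Bool.not_eq_eq_eq_not, Bool.not_true, beq_eq_false_iff_ne, ne_eq,
    List.mem_flatMap, id_eq, List.isEmpty_iff]
  constructor
  · rintro ⟨⟨c, hc, he, s, hs, h0⟩, hpure⟩
    constructor
    · refine ⟨c, hc, ⟨⟨s, hs, 0, h0, rfl⟩, fun s2 hs2 h2 => ?_⟩, he⟩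
      obtain ⟨t2, ht2, hn2⟩ := h2
      rcases hpure c hc with hnz | hall
      · exact hnz ⟨s, hs, h0⟩
      · exact hn2 (hall t2 ⟨s2, hs2, ht2⟩)
    · intro c2 hc2 hz2
      rcases hz2 with ⟨⟨s2, hs2, t2, ht2, h02⟩, ⟨s3, hs3, t3, ht3, hn3⟩⟩
      rcases hpure c2 hc2 with hnz | hall
      · exact hnz ⟨s2, hs2, h02 ▸ ht2⟩
      · exact hn3 (hall t3 ⟨s3, hs3, ht3⟩)
  · rintro ⟨⟨c, hc, ⟨hz, hnon⟩, he⟩, hmix⟩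
    obtain ⟨s, hs, t, ht, h0⟩ := hz
    refine ⟨⟨c, hc, he, s, hs, h0 ▸ ht⟩, fun c2 hc2 => ?_⟩
    by_cases hz2 : ∃ s2 ∈ c2, (0 : Int) ∈ s2
    · right
      intro t2 ⟨s2, hs2, ht2⟩
      by_contra hn2
      obtain ⟨s0, hs0, h00⟩ := hz2
      exact hmix c2 hc2 ⟨⟨s0, hs0, 0, h00, rfl⟩, ⟨s2, hs2, t2, ht2, hn2⟩⟩
    · exact Or.inl hz2

theorem pvD_iff (cs : List (List (List (List Int)))) (num : Int) :
    D_check_zeros cs num ↔ ∃ i : Nat, i < cs.length ∧ (i : Int) < num ∧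
      (cs.getD i []).any pvDZ = true ∧ (cs.getD i []).any pvDMixed = false := by
  unfold D_check_zeros
  constructor
  · rintro ⟨i, hi, hg⟩
    have h := (pv_game_iff _).mp hg
    exact ⟨i, by omega, by omega, h.1, h.2⟩
  · rintro ⟨i, h1, h2, hdz, hmix⟩
    exact ⟨i, by omega, (pv_game_iff _).mpr ⟨hdz, hmix⟩⟩

theorem pv_any_or {α : Type} (l : List α) (p q : α → Bool) :
    (l.any fun a => p a || q a) = (l.any p || l.any q) := by
  induction l with
  | nil => rfl
  | cons a rest ih =>
    simp [List.any_cons, ih, Bool.or_assoc, Bool.or_left_comm]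

-- ----- B-side characterization -----

theorem pvBGame_eq (courts : List (List (List Int))) (flags : List Bool) (i : Nat) :
    pvBGame courts flags i = if courts.any pvMixed then flags.set i true else flags := by
  induction courts with
  | nil => simp [pvBGame]
  | cons c rest ih =>
    simp only [pvBGame, List.any_cons]
    by_cases h : pvMixed c = true
    · simp [h]
    · simp [Bool.of_not_eq_true h, ih]

theorem pvBFold_length (cs : List (List (List (List Int)))) (l : List Nat) (flags : List Bool) :
    (l.foldl (fun fl i => pvBGame (cs.getD i []) fl i) flags).length = flags.length := by
  induction l generalizing flags with
  | nil => rfl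
  | cons i rest ih =>
    simp only [List.foldl_cons]
    rw [ih, pvBGame_eq]
    split <;> simp

theorem pvBFold_getD (cs : List (List (List (List Int)))) (m : Nat) (flags : List Bool)
    (hm : m ≤ flags.length) (hf : ∀ j : Nat, flags.getD j false = false) (j : Nat) :
    ((List.range m).foldl (fun fl i => pvBGame (cs.getD i []) fl i) flags).getD j false =
      (decide (j < m) && (cs.getD j []).any pvMixed) := by
  induction m with
  | zero =>
    rw [List.range_zero]
    simpa using hf j
  | succ m ih =>
    rw [List.range_succ, List.foldl_append]
    simp only [List.foldl_cons, List.foldl_nil]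
    rw [pvBGame_eq]
    set F := (List.range m).foldl (fun fl i => pvBGame (cs.getD i []) fl i) flags with hF
    have hFlen : F.length = flags.length := pvBFold_length cs _ flags
    have hIH := ih (by omega)
    by_cases hany : (cs.getD m []).any pvMixed = true
    · rw [if_pos hany]
      by_cases hjm : j = m
      · subst hjm
        have : (F.set j true).getD j false = true := by
          simp [List.getD, List.getElem?_set_self, hFlen, show j < flags.length by omega]
        rw [this, hany]
        simp
      · have : (F.set m true).getD j false = F.getD j false := by
          unfold List.getD
          rw [List.getElem?_set, if_neg (fun h => hjm h.symm)]
        rw [this, hIH]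
        by_cases hjlt : j < m
        · simp [hjlt, show j < m + 1 by omega]
        · simp [hjlt, show ¬ j < m + 1 by omega]
    · rw [if_neg hany, hIH]
      by_cases hjm : j = m
      · subst hjm
        rw [Bool.of_not_eq_true hany, Bool.and_false, Bool.and_false]
      · by_cases hjlt : j < m
        · simp [hjlt, show j < m + 1 by omega]
        · simp [hjlt, show ¬ j < m + 1 by omega]

theorem check_zeros_alt_length (cs : List (List (List (List Int)))) (num : Int) :
    (check_zeros_alt cs num).length = num.toNat := by
  unfold check_zeros_alt
  rw [pvBFold_length]
  simp

theorem check_zeros_alt_getD (cs : List (List (List (List Int)))) (num : Int) (j : Nat) :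
    (check_zeros_alt cs num).getD j false =
      (decide (j < min num.toNat cs.length) && (cs.getD j []).any pvMixed) := by
  unfold check_zeros_alt
  rw [pvBFold_getD cs _ _ (by simp) (fun j2 => by
    unfold List.getD
    rcases Nat.lt_or_ge j2 num.toNat with h | h
    · simp [List.getElem?_replicate, h]
    · rw [List.getElem?_eq_none_iff.mpr (by simpa using h)]
      rfl)]
  simp

theorem check_zeros_length (cs : List (List (List (List Int)))) (num : Int) :
    (check_zeros cs num).length = num.toNat := by
  unfold check_zeros
  rw [pvGameLoop_length]
  simp

theorem check_zeros_getD (cs : List (List (List (List Int)))) (num : Int)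
    (hpre : Pre_check_zeros cs num) (j : Nat) :
    (check_zeros cs num).getD j false =
      (decide (j < cs.length) && (cs.getD j []).any pvCourtBad) := by
  unfold check_zeros
  rw [pvGameLoop_getD cs _ 0
    (fun i hi h => by
      have h1 := hpre i hi (by simpa using h)
      simp only [List.length_replicate]
      omega)
    (fun j2 _ => by
      unfold List.getD
      rcases Nat.lt_or_ge j2 num.toNat with h | h
      · simp [List.getElem?_replicate, h]
      · rw [List.getElem?_eq_none_iff.mpr (by simpa using h)]
        rfl) j]
  simp

-- ===== VERDICT (by name: the statements are the Claim_ definitions above) =====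
theorem check_zeros_spec : Claim_unchanged_check_zeros := by
  intro cs num _ hpre
  unfold Spec_check_zeros
  intro hnd
  apply List.ext_getElem
  · rw [check_zeros_length, check_zeros_alt_length]
  · intro j hj1 hj2
    have hjn : j < num.toNat := by rwa [check_zeros_length] at hj1
    have hA : (check_zeros cs num)[j] = (check_zeros cs num).getD j false := by
      simp [List.getD, List.getElem?_eq_getElem hj1]
    have hB : (check_zeros_alt cs num)[j] = (check_zeros_alt cs num).getD j false := by
      simp [List.getD, List.getElem?_eq_getElem hj2]
    rw [hA, hB, check_zeros_getD cs num hpre j, check_zeros_alt_getD cs num j]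
    by_cases hcs : j < cs.length
    · have hmin : j < min num.toNat cs.length := by omega
      rw [decide_eq_true hcs, decide_eq_true hmin, Bool.true_and, Bool.true_and]
      have hcb : (cs.getD j []).any pvCourtBad =
          ((cs.getD j []).any pvMixed || (cs.getD j []).any pvDZ) := by
        rw [← pv_any_or]
        exact pv_any_ext _ _ _ pvCourtBad_eq
      rw [hcb]
      by_cases hdz : (cs.getD j []).any pvDZ = true
      · have hmix : (cs.getD j []).any pvDMixed = true := by
          by_contra hmixf
          exact hnd ((pvD_iff cs num).mpr ⟨j, hcs, by omega, hdz, Bool.of_not_eq_true hmixf⟩)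
        have : (cs.getD j []).any pvMixed = true := by
          rw [← pv_any_ext _ _ _ pvDMixed_eq]
          exact hmix
        rw [this, hdz]
        rfl
      · rw [Bool.of_not_eq_true hdz, Bool.or_false]
    · have : ¬ j < min num.toNat cs.length := by omega
      rw [decide_eq_false hcs, decide_eq_false this]
      rfl

theorem check_zeros_changed : Claim_changed_check_zeros := by
  unfold Claim_changed_check_zeros
  decide

theorem check_zeros_tight : Claim_exact_check_zeros := by
  intro cs num _ hpre hD heq
  obtain ⟨i, hi, hnum, hdz, hmix⟩ := (pvD_iff cs num).mp hD
  have hin : i < num.toNat := by omega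
  have hAg := check_zeros_getD cs num hpre i
  have hBg := check_zeros_alt_getD cs num i
  have hcb : (cs.getD i []).any pvCourtBad =
      ((cs.getD i []).any pvMixed || (cs.getD i []).any pvDZ) := by
    rw [← pv_any_or]
    exact pv_any_ext _ _ _ pvCourtBad_eq
  have hmixB : (cs.getD i []).any pvMixed = false := by
    rw [← pv_any_ext _ _ _ pvDMixed_eq]
    exact hmix
  rw [hcb, hmixB, hdz, decide_eq_true hi, Bool.false_or, Bool.true_and] at hAg
  rw [hmixB, Bool.and_false] at hBg
  rw [heq, hBg] at hAg
  exact Bool.false_ne_true hAg
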